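-- pv_equiv track=rewrite | github.com/aaronsb/cwmc | src/livetranscripts/api_key_manager.py | validate_gemini_key
-- ===== SOURCE A (Python) =====
-- from typing import Dict, Optional, Union
--
-- def validate_gemini_key(key: Optional[str]) -> bool:
--     """Validate Gemini/Google API key format.
--
--     Google API keys typically start with 'AIza' and are 39 characters.
--     """
--     if not key or not isinstance(key, str):
--         return False
--
--     # Check format: AIza followed by any characters totaling 39 chars
--     # Google API keys can have various characters including hyphens after the prefix
--     if len(key) != 39 or not key.startswith('AIza'):
--         return False
--
--     # Check that remaining characters are alphanumeric, dash, or underscore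
--     # Note: We already checked length and prefix, so just verify allowed chars
--     allowed_chars = set('abcdefghijklmnopqrstuvwxyzABCDEFGHIJKLMNOPQRSTUVWXYZ0123456789_-')
--     remaining = key[4:]  # Skip 'AIza'
--     return all(c in allowed_chars for c in remaining)
-- ===== SOURCE B (Python) =====
-- import re
--
-- _GEMINI_KEY_RE = re.compile(r'AIza[A-Za-z0-9_-]{35}')
--
-- def validate_gemini_key(key):
--     """Validate Gemini/Google API key format: 'AIza' + 35 chars of [A-Za-z0-9_-]."""
--     if not key or not isinstance(key, str):
--         return False
--     return _GEMINI_KEY_RE.fullmatch(key) is not None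
-- ===== Notes on version B (the rewrite author's own statement) =====
-- stated objective: idiomatic
-- what changed: Replaces A's staged length check, startswith test, allowed-character set and all()-scan over key[4:] by a single regex fullmatch of the pattern AIza[A-Za-z0-9_-]{35} (ported to Lean as a token-list pattern matcher), keeping only the None/empty/non-str guard.
import Mathlib
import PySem

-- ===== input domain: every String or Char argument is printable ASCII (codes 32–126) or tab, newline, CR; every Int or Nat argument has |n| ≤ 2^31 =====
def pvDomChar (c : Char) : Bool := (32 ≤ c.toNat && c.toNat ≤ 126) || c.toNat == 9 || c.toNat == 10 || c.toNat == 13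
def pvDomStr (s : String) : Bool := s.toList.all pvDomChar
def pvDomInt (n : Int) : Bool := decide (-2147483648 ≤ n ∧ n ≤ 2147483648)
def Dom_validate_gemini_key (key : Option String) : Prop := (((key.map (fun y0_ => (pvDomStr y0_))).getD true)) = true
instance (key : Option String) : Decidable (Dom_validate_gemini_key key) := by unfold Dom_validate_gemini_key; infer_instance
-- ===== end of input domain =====

-- B keeps only the None/empty guard and replaces A's staged length / startswith / allowed-set checks
-- by one regex fullmatch of AIza[A-Za-z0-9_-]{35}, ported as a token-list pattern matcher (idiomatic, same cost).

-- ===== PORT A =====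
def validate_gemini_key (key : Option String) : Bool :=
  match key with
  | none => false                       -- `not key` (None)
  | some s =>
    let cs := s.toList
    if cs.isEmpty then false            -- `not key` (empty string)
    else if !(cs.length == 39) || !(PySem.Chars.startswith cs "AIza".toList) then false
    else
      let allowed := PySem.Set.ofList "abcdefghijklmnopqrstuvwxyzABCDEFGHIJKLMNOPQRSTUVWXYZ0123456789_-".toList
      (PySem.List.slice cs (some 4) none).all (fun c => PySem.Set.contains allowed c)

-- ===== PORT B =====
-- the regex pattern AIza[A-Za-z0-9_-]{35} as a token list: literal chars and a counted class
inductive RTok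
  | lit : Char → RTok
  | cls : Nat → RTok          -- [A-Za-z0-9_-]{n}
deriving DecidableEq, Repr

-- the character class [A-Za-z0-9_-]: ASCII ranges, exact for re's explicit class
def pvWordc (c : Char) : Bool :=
  (decide ('A' ≤ c) && decide (c ≤ 'Z')) || (decide ('a' ≤ c) && decide (c ≤ 'z')) ||
  (decide ('0' ≤ c) && decide (c ≤ '9')) || c == '_' || c == '-'

-- fullmatch of a token-list pattern against the whole character list (re.fullmatch semantics
-- for this backtracking-free pattern: every token consumes exactly its characters)
def pvFullmatch : List RTok → List Char → Bool
  | [], [] => true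
  | [], _ :: _ => false
  | RTok.lit _ :: _, [] => false
  | RTok.lit a :: ts, c :: cs => if c == a then pvFullmatch ts cs else false
  | RTok.cls 0 :: ts, cs => pvFullmatch ts cs
  | RTok.cls (_+1) :: _, [] => false
  | RTok.cls (n+1) :: ts, c :: cs => if pvWordc c then pvFullmatch (RTok.cls n :: ts) cs else false
termination_by ts cs => (cs.length, ts.length)

def pvGeminiPat : List RTok := [.lit 'A', .lit 'I', .lit 'z', .lit 'a', .cls 35]

def validate_gemini_key_alt (key : Option String) : Bool :=
  match key with
  | none => false                       -- `not key` (None)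
  | some s =>
    if s.toList.isEmpty then false      -- `not key` (empty string)
    else pvFullmatch pvGeminiPat s.toList

-- ===== PRECONDITION & SPEC =====
def Spec_validate_gemini_key (key : Option String) (out : Bool) : Prop := out = validate_gemini_key_alt key
instance (key : Option String) (out : Bool) : Decidable (Spec_validate_gemini_key key out) := by unfold Spec_validate_gemini_key; infer_instance

-- ===== CLAIM (what is proved, stated in full; the proofs are below) =====
def Claim_equal_validate_gemini_key : Prop := ∀ (key : Option String), Dom_validate_gemini_key key → Spec_validate_gemini_key key (validate_gemini_key key)

-- ===== LEMMAS AND PROOFS =====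

-- A's 64-character allowed set admits exactly the characters of the regex class
lemma pvClass_eq (c : Char) :
    PySem.Set.contains (PySem.Set.ofList "abcdefghijklmnopqrstuvwxyzABCDEFGHIJKLMNOPQRSTUVWXYZ0123456789_-".toList) c = pvWordc c := by
  rw [Bool.eq_iff_iff, PySem.Set.contains_iff, PySem.Set.mem_ofList]
  rw [show "abcdefghijklmnopqrstuvwxyzABCDEFGHIJKLMNOPQRSTUVWXYZ0123456789_-".toList = ['a', 'b', 'c', 'd', 'e', 'f', 'g', 'h', 'i', 'j', 'k', 'l', 'm', 'n', 'o', 'p', 'q', 'r', 's', 't', 'u', 'v', 'w', 'x', 'y', 'z', 'A', 'B', 'C', 'D', 'E', 'F', 'G', 'H', 'I', 'J', 'K', 'L', 'M', 'N', 'O', 'P', 'Q', 'R', 'S', 'T', 'U', 'V', 'W', 'X', 'Y', 'Z', '0', '1', '2', '3', '4', '5', '6', '7', '8', '9', '_', '-'] from rfl]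
  simp only [List.mem_cons, List.not_mem_nil, or_false, pvWordc, Bool.or_eq_true,
    Bool.and_eq_true, decide_eq_true_eq, beq_iff_eq, Char.le_def, Char.ext_iff,
    UInt32.le_iff_toNat_le, UInt32.ext_iff]
  simp only [show ('a').val.toNat = 97 from rfl,
    show ('b').val.toNat = 98 from rfl,
    show ('c').val.toNat = 99 from rfl,
    show ('d').val.toNat = 100 from rfl,
    show ('e').val.toNat = 101 from rfl,
    show ('f').val.toNat = 102 from rfl,
    show ('g').val.toNat = 103 from rfl,
    show ('h').val.toNat = 104 from rfl,
    show ('i').val.toNat = 105 from rfl,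
    show ('j').val.toNat = 106 from rfl,
    show ('k').val.toNat = 107 from rfl,
    show ('l').val.toNat = 108 from rfl,
    show ('m').val.toNat = 109 from rfl,
    show ('n').val.toNat = 110 from rfl,
    show ('o').val.toNat = 111 from rfl,
    show ('p').val.toNat = 112 from rfl,
    show ('q').val.toNat = 113 from rfl,
    show ('r').val.toNat = 114 from rfl,
    show ('s').val.toNat = 115 from rfl,
    show ('t').val.toNat = 116 from rfl,
    show ('u').val.toNat = 117 from rfl,
    show ('v').val.toNat = 118 from rfl,
    show ('w').val.toNat = 119 from rfl,
    show ('x').val.toNat = 120 from rfl,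
    show ('y').val.toNat = 121 from rfl,
    show ('z').val.toNat = 122 from rfl,
    show ('A').val.toNat = 65 from rfl,
    show ('B').val.toNat = 66 from rfl,
    show ('C').val.toNat = 67 from rfl,
    show ('D').val.toNat = 68 from rfl,
    show ('E').val.toNat = 69 from rfl,
    show ('F').val.toNat = 70 from rfl,
    show ('G').val.toNat = 71 from rfl,
    show ('H').val.toNat = 72 from rfl,
    show ('I').val.toNat = 73 from rfl,
    show ('J').val.toNat = 74 from rfl,
    show ('K').val.toNat = 75 from rfl,
    show ('L').val.toNat = 76 from rfl,
    show ('M').val.toNat = 77 from rfl,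
    show ('N').val.toNat = 78 from rfl,
    show ('O').val.toNat = 79 from rfl,
    show ('P').val.toNat = 80 from rfl,
    show ('Q').val.toNat = 81 from rfl,
    show ('R').val.toNat = 82 from rfl,
    show ('S').val.toNat = 83 from rfl,
    show ('T').val.toNat = 84 from rfl,
    show ('U').val.toNat = 85 from rfl,
    show ('V').val.toNat = 86 from rfl,
    show ('W').val.toNat = 87 from rfl,
    show ('X').val.toNat = 88 from rfl,
    show ('Y').val.toNat = 89 from rfl,
    show ('Z').val.toNat = 90 from rfl,
    show ('0').val.toNat = 48 from rfl,
    show ('1').val.toNat = 49 from rfl,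
    show ('2').val.toNat = 50 from rfl,
    show ('3').val.toNat = 51 from rfl,
    show ('4').val.toNat = 52 from rfl,
    show ('5').val.toNat = 53 from rfl,
    show ('6').val.toNat = 54 from rfl,
    show ('7').val.toNat = 55 from rfl,
    show ('8').val.toNat = 56 from rfl,
    show ('9').val.toNat = 57 from rfl,
    show ('_').val.toNat = 95 from rfl,
    show ('-').val.toNat = 45 from rfl]
  omega

-- a trailing counted class matches iff the remainder has exactly that length and all chars in class
lemma pvFullmatch_cls (cs : List Char) : ∀ n, pvFullmatch [RTok.cls n] cs = ((cs.length == n) && cs.all pvWordc) := by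
  induction cs with
  | nil =>
    intro n
    cases n with
    | zero => simp [pvFullmatch]
    | succ m => simp [pvFullmatch]
  | cons c r ih =>
    intro n
    cases n with
    | zero => simp [pvFullmatch]
    | succ m =>
      simp only [pvFullmatch, ih m, List.all_cons, List.length_cons]
      cases h : pvWordc c <;> simp

lemma pvMain (key : Option String) : validate_gemini_key key = validate_gemini_key_alt key := by
  cases key with
  | none => rfl
  | some s =>
    simp only [validate_gemini_key, validate_gemini_key_alt]
    by_cases hE : s.toList.isEmpty
    · rw [if_pos hE, if_pos hE]
    · rw [if_neg hE, if_neg hE]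
      generalize hg : s.toList = cs
      rcases cs with _ | ⟨c0, _ | ⟨c1, _ | ⟨c2, _ | ⟨c3, rest⟩⟩⟩⟩
      -- lists shorter than 4: A fails the length test, B fails a literal token at end of input
      · simp [pvFullmatch, pvGeminiPat]
      · rw [if_pos (by simp)]
        simp [pvGeminiPat, pvFullmatch]
      · rw [if_pos (by simp)]
        simp [pvGeminiPat, pvFullmatch]
      · rw [if_pos (by simp)]
        simp [pvGeminiPat, pvFullmatch]
      · -- at least four characters: both sides reduce to the same prefix + class conditions
        have hB : pvFullmatch pvGeminiPat (c0::c1::c2::c3::rest)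
            = (if c0 == 'A' then if c1 == 'I' then if c2 == 'z' then if c3 == 'a'
                then ((rest.length == 35) && rest.all pvWordc) else false else false else false else false) := by
          simp only [pvGeminiPat, pvFullmatch, pvFullmatch_cls]
        rw [hB]
        have hpre : PySem.Chars.startswith ((c0::c1::c2::c3::rest) : List Char) "AIza".toList
            = ((c0 == 'A') && (c1 == 'I') && (c2 == 'z') && (c3 == 'a')) := by
          simp only [PySem.Chars.startswith]
          rw [Bool.eq_iff_iff, List.isPrefixOf_iff_prefix,
            show "AIza".toList = ['A','I','z','a'] from rfl]
          simp only [List.cons_prefix_cons, List.nil_prefix, and_true,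
            Bool.and_eq_true, beq_iff_eq, @eq_comm Char]
          tauto
        have hall : (PySem.List.slice ((c0::c1::c2::c3::rest) : List Char) (some 4) none).all
            (fun c => PySem.Set.contains (PySem.Set.ofList "abcdefghijklmnopqrstuvwxyzABCDEFGHIJKLMNOPQRSTUVWXYZ0123456789_-".toList) c)
            = rest.all pvWordc := by
          rw [PySem.List.slice_from _ (show (0:Int) ≤ 4 by norm_num)]
          show (rest.all _) = _
          simp only [pvClass_eq]
        have hlen : (((c0::c1::c2::c3::rest) : List Char).length == 39) = (rest.length == 35) := by
          simp only [List.length_cons]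
          rw [Bool.eq_iff_iff, beq_iff_eq, beq_iff_eq]
          omega
        rw [hlen, hpre, hall]
        cases h35 : (rest.length == 35) <;>
          cases h0 : (c0 == 'A') <;> cases h1 : (c1 == 'I') <;> cases h2 : (c2 == 'z') <;>
          cases h3 : (c3 == 'a') <;> simp

-- ===== VERDICT (by name: the statement is the Claim_ definition above) =====
theorem validate_gemini_key_spec : Claim_equal_validate_gemini_key := by
  intro key _
  unfold Spec_validate_gemini_key
  exact pvMain key
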